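-- pv_equiv track=rewrite | github.com/Steve-s2024/Competitive-Programming-root-folder | LeetCode root folder 8/Number of Stable Subsequences.py | countStableSubsequences
-- ===== SOURCE A (Python) =====
-- from typing import List
--
-- def countStableSubsequences(nums: List[int]) -> int:
--     n = len(nums)
--     MOD = 10 ** 9 + 7
--
--     dp = [[1] * 3 for _ in range(3)]
--     for i in range(n - 1, -1, -1):
--         tmp = [[0] * 3 for _ in range(3)]
--         for pf in range(3):
--             for cf in range(3):
--                 tmp[pf][cf] += dp[pf][cf]
--                 if nums[i] % 2 == pf and cf < 2:
--                     tmp[pf][cf] += dp[pf][cf + 1]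
--                 elif nums[i] % 2 != pf:
--                     tmp[pf][cf] += dp[nums[i] % 2][1]
--                 tmp[pf][cf] %= MOD
--         dp = tmp
--     return dp[2][0] - 1
-- ===== SOURCE B (Python) =====
-- from typing import List
--
-- def countStableSubsequences(nums: List[int]) -> int:
--     # Different algorithm: run-length encode the parity sequence, then apply a
--     # closed-form (triangular-number) update once per run instead of a DP step
--     # per element.
--     MOD = 10 ** 9 + 7
--     # pass 1: run-length encode parities
--     runs = []
--     cp = None
--     ck = 0
--     for x in nums:
--         p = x % 2
--         if p == cp:
--             ck += 1
--         else:
--             if ck != 0: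
--                 runs.append((cp, ck))
--             cp = p
--             ck = 1
--     if ck != 0:
--         runs.append((cp, ck))
--     # pass 2: closed-form update per run
--     # e1,e2 (o1,o2): stable subsequences ending in a run of exactly 1 / 2 evens (odds)
--     e1 = e2 = o1 = o2 = 0
--     for p, k in runs:
--         if p == 0:
--             s = (o1 + o2 + 1) % MOD
--             e2 = (e2 + k * e1 + s * (k * (k - 1) // 2)) % MOD
--             e1 = (e1 + k * s) % MOD
--         else:
--             s = (e1 + e2 + 1) % MOD
--             o2 = (o2 + k * o1 + s * (k * (k - 1) // 2)) % MOD
--             o1 = (o1 + k * s) % MOD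
--     return (e1 + e2 + o1 + o2 + 1) % MOD - 1
-- ===== Notes on version B (the rewrite author's own statement) =====
-- stated objective: faster
-- what changed: A's per-element backward rebuild of a 3x3 DP table (nested pf/cf loops allocating 9 cells per element) is replaced by run-length encoding the parity sequence and one closed-form (triangular-number) counter update per maximal parity run; the final (count+1)%MOD-1 reproduces A's unmodded subtraction exactly.
import Mathlib
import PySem

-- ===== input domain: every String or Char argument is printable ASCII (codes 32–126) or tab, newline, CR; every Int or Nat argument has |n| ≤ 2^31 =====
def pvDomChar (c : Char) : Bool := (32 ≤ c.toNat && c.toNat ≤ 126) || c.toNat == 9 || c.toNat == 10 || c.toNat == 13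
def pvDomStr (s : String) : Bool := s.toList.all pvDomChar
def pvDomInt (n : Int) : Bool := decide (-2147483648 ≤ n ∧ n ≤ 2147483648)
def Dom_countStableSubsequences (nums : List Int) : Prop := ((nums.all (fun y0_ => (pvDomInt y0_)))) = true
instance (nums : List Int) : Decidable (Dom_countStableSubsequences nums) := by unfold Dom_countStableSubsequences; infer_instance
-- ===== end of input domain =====

-- B replaces A's per-element backward 3x3 DP by run-length encoding the parity
-- sequence and one closed-form (triangular-number) counter update per run.

-- ===== PORT A =====
-- one iteration of A's backward loop: builds tmp cell by cell from dp
def pvStepA (x : Int) (dp : List (List Int)) : List (List Int) :=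
  (List.range 3).map (fun pf =>
    (List.range 3).map (fun cf =>
      let v := (dp.getD pf []).getD cf 0
      let v :=
        if PySem.Int.mod x 2 = (pf : Int) ∧ cf < 2 then
          v + (dp.getD pf []).getD (cf + 1) 0
        else if PySem.Int.mod x 2 ≠ (pf : Int) then
          v + (PySem.List.pyGetD dp (PySem.Int.mod x 2) []).getD 1 0
        else v
      PySem.Int.mod v (10 ^ 9 + 7)))

def countStableSubsequences (nums : List Int) : Int :=
  let n : Int := PySem.List.len nums
  let dp0 : List (List Int) := (List.range 3).map (fun _ => List.replicate 3 1)
  let dp := (PySem.List.pyRange (n - 1) (-1) (-1)).foldl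
      (fun dp i => pvStepA (PySem.List.pyGetD nums i 0) dp) dp0
  (dp.getD 2 []).getD 0 0 - 1

-- ===== PORT B =====
-- pass-1 step: run-length-encoding accumulator (runs so far, current parity, current count)
def pvEncStep (st : List (Int × Int) × Option Int × Int) (x : Int) :
    List (Int × Int) × Option Int × Int :=
  let (runs, cp, ck) := st
  let p := PySem.Int.mod x 2
  if cp = some p then (runs, cp, ck + 1)
  else ((if ck ≠ 0 then runs ++ [(cp.getD 0, ck)] else runs), some p, 1)

def pvRunsOf (nums : List Int) : List (Int × Int) :=
  let e := nums.foldl pvEncStep ([], none, 0)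
  if e.2.2 ≠ 0 then e.1 ++ [(e.2.1.getD 0, e.2.2)] else e.1

-- pass-2: closed-form update for a whole run (p, k)
def pvRunStep (st : Int × Int × Int × Int) (r : Int × Int) : Int × Int × Int × Int :=
  let (e1, e2, o1, o2) := st
  let (p, k) := r
  let M : Int := 10 ^ 9 + 7
  if p = 0 then
    let s := PySem.Int.mod (o1 + o2 + 1) M
    (PySem.Int.mod (e1 + k * s) M,
     PySem.Int.mod (e2 + k * e1 + s * PySem.Int.floordiv (k * (k - 1)) 2) M, o1, o2)
  else
    let s := PySem.Int.mod (e1 + e2 + 1) M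
    (e1, e2, PySem.Int.mod (o1 + k * s) M,
     PySem.Int.mod (o2 + k * o1 + s * PySem.Int.floordiv (k * (k - 1)) 2) M)

def countStableSubsequences_alt (nums : List Int) : Int :=
  let f := (pvRunsOf nums).foldl pvRunStep (0, 0, 0, 0)
  PySem.Int.mod (f.1 + f.2.1 + f.2.2.1 + f.2.2.2 + 1) (10 ^ 9 + 7) - 1

-- ===== PRECONDITION & SPEC =====
def Spec_countStableSubsequences (nums : List Int) (out : Int) : Prop := out = countStableSubsequences_alt nums
instance (nums : List Int) (out : Int) : Decidable (Spec_countStableSubsequences nums out) := by unfold Spec_countStableSubsequences; infer_instance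

-- ===== CLAIM (what is proved, stated in full; the proofs are below) =====
def Claim_equal_countStableSubsequences : Prop := ∀ (nums : List Int), Dom_countStableSubsequences nums → Spec_countStableSubsequences nums (countStableSubsequences nums)

-- ===== LEMMAS AND PROOFS =====

-- the working ring: integers mod 10^9+7
abbrev pvZ : Type := ZMod 1000000007

def pvcast (a : Int) : pvZ := (a : pvZ)

-- per-element forward step in pvZ on (e1, e2, o1, o2)
def pvFz (p : Int) (g : pvZ × pvZ × pvZ × pvZ) : pvZ × pvZ × pvZ × pvZ :=
  let (e1, e2, o1, o2) := g
  if p = 0 then (e1 + o1 + o2 + 1, e2 + e1, o1, o2)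
  else (e1, e2, o1 + e1 + e2 + 1, o2 + o1)

def pvPhi (st : Int × Int × Int × Int) : pvZ × pvZ × pvZ × pvZ :=
  (pvcast st.1, pvcast st.2.1, pvcast st.2.2.1, pvcast st.2.2.2)

def pvCell (dp : List (List Int)) (i j : Nat) : Int := (dp.getD i []).getD j 0

-- pairing of a forward pvZ-state with a backward dp table
def pvP (g : pvZ × pvZ × pvZ × pvZ) (dp : List (List Int)) : pvZ :=
  pvcast (pvCell dp 2 0) + g.1 * pvcast (pvCell dp 0 1) + g.2.1 * pvcast (pvCell dp 0 2) +
    g.2.2.1 * pvcast (pvCell dp 1 1) + g.2.2.2 * pvcast (pvCell dp 1 2)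

def pvDpInit : List (List Int) := (List.range 3).map (fun _ => List.replicate 3 1)

lemma pvMod_two_cases (x : Int) : PySem.Int.mod x 2 = 0 ∨ PySem.Int.mod x 2 = 1 := by
  have h1 := PySem.Int.mod_nonneg x (b := 2) (by norm_num)
  have h2 := PySem.Int.mod_lt x (b := 2) (by norm_num)
  omega

lemma pvcast_emod (a : Int) : pvcast (a % 1000000007) = pvcast a := by
  show (((a % (1000000007 : Int)) : Int) : ZMod 1000000007) = ((a : Int) : ZMod 1000000007)
  have h : ((1000000007 : Int)) = ((1000000007 : ℕ) : Int) := by norm_num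
  rw [h, ZMod.intCast_mod]

lemma pvcast_mod (a : Int) : pvcast (PySem.Int.mod a (10 ^ 9 + 7)) = pvcast a := by
  rw [PySem.Int.mod_eq_emod_of_pos (by norm_num)]
  rw [show ((10 : Int) ^ 9 + 7) = (1000000007 : Int) from by norm_num]
  exact pvcast_emod a

lemma pvcast_add (a b : Int) : pvcast (a + b) = pvcast a + pvcast b := by
  simp [pvcast]

lemma pvcast_mul (a b : Int) : pvcast (a * b) = pvcast a * pvcast b := by
  simp [pvcast]

lemma pvcast_one : pvcast 1 = (1 : pvZ) := by simp [pvcast]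

lemma pvcast_zero : pvcast 0 = (0 : pvZ) := by simp [pvcast]

lemma pvcast_natCast (n : Nat) : pvcast ((n : ℕ) : Int) = (n : pvZ) := by simp [pvcast]

-- one-step pairing commutation
lemma pvPair_step (x : Int) (dp : List (List Int)) (g : pvZ × pvZ × pvZ × pvZ) :
    pvP g (pvStepA x dp) = pvP (pvFz (PySem.Int.mod x 2) g) dp := by
  obtain ⟨e1, e2, o1, o2⟩ := g
  rcases pvMod_two_cases x with hx | hx <;>
    · simp only [pvP, pvCell, pvStepA, pvFz, hx, show List.range 3 = [0, 1, 2] from rfl,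
        List.map_cons, List.map_nil]
      norm_num
      simp only [PySem.List.pyGetD_ofNat', List.getD, pvcast_emod, pvcast_add]
      ring

-- fold pairing
lemma pvPair_fold (l : List Int) (g : pvZ × pvZ × pvZ × pvZ) :
    pvP g (l.foldr (fun x dp => pvStepA x dp) pvDpInit) =
      pvP (l.foldl (fun a x => pvFz (PySem.Int.mod x 2) a) g) pvDpInit := by
  induction l generalizing g with
  | nil => rfl
  | cons x l ih =>
      simp only [List.foldr_cons, List.foldl_cons]
      rw [pvPair_step, ih]

-- range of A's answer cell
lemma pvCell_step_range (x : Int) (dp : List (List Int)) :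
    0 ≤ pvCell (pvStepA x dp) 2 0 ∧ pvCell (pvStepA x dp) 2 0 < 10 ^ 9 + 7 := by
  simp only [pvStepA, pvCell, show List.range 3 = [0, 1, 2] from rfl, List.map_cons,
    List.map_nil, List.getD, List.getElem?_cons_zero, List.getElem?_cons_succ, Option.getD_some]
  exact ⟨PySem.Int.mod_nonneg _ (by norm_num), PySem.Int.mod_lt _ (by norm_num)⟩

lemma pvCell_range (l : List Int) :
    0 ≤ pvCell (l.foldr (fun x dp => pvStepA x dp) pvDpInit) 2 0 ∧
      pvCell (l.foldr (fun x dp => pvStepA x dp) pvDpInit) 2 0 < 10 ^ 9 + 7 := by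
  cases l with
  | nil => norm_num [pvCell, pvDpInit]
  | cons x l => exact pvCell_step_range x _

-- triangular numbers in pvZ
def pvT (n : Nat) : pvZ := ((∑ i ∈ Finset.range n, i : ℕ) : pvZ)

lemma pvT_zero : pvT 0 = 0 := by simp [pvT]

lemma pvT_succ (n : Nat) : pvT (n + 1) = pvT n + (n : pvZ) := by
  simp [pvT, Finset.sum_range_succ]

lemma pvFloordiv_tri (kn : Nat) :
    PySem.Int.floordiv ((kn : Int) * ((kn : Int) - 1)) 2 =
      ((∑ i ∈ Finset.range kn, i : ℕ) : Int) := by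
  cases kn with
  | zero => decide
  | succ m =>
      have h1 : ((m + 1 : ℕ) : Int) * (((m + 1 : ℕ) : Int) - 1) = (((m + 1) * m : ℕ) : Int) := by
        push_cast; ring
      rw [h1, show (2 : Int) = ((2 : ℕ) : Int) from rfl, PySem.Int.floordiv_natCast]
      congr 1
      have h2 : (m + 1) * m = (∑ i ∈ Finset.range (m + 1), i) * 2 := by
        have := Finset.sum_range_id_mul_two (m + 1)
        simpa using this.symm
      exact Nat.div_eq_of_eq_mul_left (by norm_num) h2

-- closed form for iterating pvFz with parity 0
lemma pvFz_pow_zero (kn : Nat) (e1 e2 o1 o2 : pvZ) :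
    (pvFz 0)^[kn] (e1, e2, o1, o2) =
      (e1 + (kn : pvZ) * (o1 + o2 + 1), e2 + (kn : pvZ) * e1 + pvT kn * (o1 + o2 + 1), o1, o2) := by
  induction kn with
  | zero => simp [pvT_zero]
  | succ m ih =>
      rw [Function.iterate_succ_apply', ih]
      simp only [pvFz, reduceIte, pvT_succ, Nat.cast_succ]
      exact Prod.ext (by ring) (Prod.ext (by ring) rfl)

-- closed form for iterating pvFz with a nonzero parity
lemma pvFz_pow_one (p : Int) (hp : p ≠ 0) (kn : Nat) (e1 e2 o1 o2 : pvZ) :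
    (pvFz p)^[kn] (e1, e2, o1, o2) =
      (e1, e2, o1 + (kn : pvZ) * (e1 + e2 + 1), o2 + (kn : pvZ) * o1 + pvT kn * (e1 + e2 + 1)) := by
  induction kn with
  | zero => simp [pvT_zero]
  | succ m ih =>
      rw [Function.iterate_succ_apply', ih]
      simp only [pvFz, if_neg hp, pvT_succ, Nat.cast_succ]
      
      exact Prod.ext rfl (Prod.ext rfl (Prod.ext (by ring) (by ring)))

-- pvRunStep computes the iterate, through pvPhi
lemma pvRunStep_phi (st : Int × Int × Int × Int) (p : Int) (k : Int) (hk : 0 ≤ k) :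
    pvPhi (pvRunStep st (p, k)) = (pvFz p)^[k.toNat] (pvPhi st) := by
  obtain ⟨e1, e2, o1, o2⟩ := st
  obtain ⟨kn, rfl⟩ : ∃ kn : ℕ, k = (kn : Int) := ⟨k.toNat, (Int.toNat_of_nonneg hk).symm⟩
  rw [Int.toNat_natCast]
  by_cases hp : p = 0
  · subst hp
    rw [show pvPhi (e1, e2, o1, o2) = (pvcast e1, pvcast e2, pvcast o1, pvcast o2) from rfl,
      pvFz_pow_zero]
    simp only [pvRunStep, reduceIte, pvPhi, pvFloordiv_tri]
    refine Prod.ext ?_ (Prod.ext ?_ rfl)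
    · simp only [pvcast_mod, pvcast_add, pvcast_mul, pvcast_one, pvcast_natCast]
      try ring
    · simp only [pvcast_mod, pvcast_add, pvcast_mul, pvcast_one, pvcast_natCast, pvT]
      ring
  · rw [show pvPhi (e1, e2, o1, o2) = (pvcast e1, pvcast e2, pvcast o1, pvcast o2) from rfl,
      pvFz_pow_one p hp]
    simp only [pvRunStep, if_neg hp, pvPhi, pvFloordiv_tri]
    refine Prod.ext rfl (Prod.ext rfl (Prod.ext ?_ ?_))
    · simp only [pvcast_mod, pvcast_add, pvcast_mul, pvcast_one, pvcast_natCast]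
      try ring
    · simp only [pvcast_mod, pvcast_add, pvcast_mul, pvcast_one, pvcast_natCast, pvT]
      ring

-- fold of pvRunStep through pvPhi
def pvApplyZ (g : pvZ × pvZ × pvZ × pvZ) (rs : List (Int × Int)) : pvZ × pvZ × pvZ × pvZ :=
  rs.foldl (fun a r => (pvFz r.1)^[r.2.toNat] a) g

lemma pvRunFold_phi (rs : List (Int × Int)) (st : Int × Int × Int × Int)
    (h : ∀ r ∈ rs, 0 ≤ r.2) :
    pvPhi (rs.foldl pvRunStep st) = pvApplyZ (pvPhi st) rs := by
  induction rs generalizing st with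
  | nil => rfl
  | cons r rs ih =>
      simp only [List.foldl_cons, pvApplyZ] at *
      rw [ih _ (fun r hr => h r (List.mem_cons_of_mem _ hr)),
        ← pvRunStep_phi st r.1 r.2 (h r List.mem_cons_self)]

-- the flush of an accumulator, as in pvRunsOf
def pvFlush (a : List (Int × Int) × Option Int × Int) : List (Int × Int) :=
  if a.2.2 ≠ 0 then a.1 ++ [(a.2.1.getD 0, a.2.2)] else a.1

lemma pvRunsOf_eq (nums : List Int) :
    pvRunsOf nums = pvFlush (nums.foldl pvEncStep ([], none, 0)) := rfl

def pvInv (a : List (Int × Int) × Option Int × Int) : Prop :=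
  0 ≤ a.2.2 ∧ ∀ r ∈ a.1, 0 ≤ r.2

lemma pvFlush_nonneg (a : List (Int × Int) × Option Int × Int) (ha : pvInv a) :
    ∀ r ∈ pvFlush a, 0 ≤ r.2 := by
  obtain ⟨h1, h2⟩ := ha
  intro r hr
  unfold pvFlush at hr
  by_cases h : a.2.2 ≠ 0
  · rw [if_pos h] at hr
    rcases List.mem_append.mp hr with h' | h'
    · exact h2 r h'
    · simp at h'; subst h'; exact h1
  · rw [if_neg h] at hr
    exact h2 r hr

lemma pvApplyZ_flush (g : pvZ × pvZ × pvZ × pvZ) (runs : List (Int × Int))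
    (cp : Option Int) (ck : Int) :
    pvApplyZ g (pvFlush (runs, cp, ck)) = (pvFz (cp.getD 0))^[ck.toNat] (pvApplyZ g runs) := by
  by_cases h : ck = 0
  · subst h; simp [pvFlush, pvApplyZ]
  · rw [show pvFlush (runs, cp, ck) = runs ++ [(cp.getD 0, ck)] from if_pos h]
    simp [pvApplyZ, List.foldl_append]

-- one step of the encoding pass
lemma pvEnc_step (x : Int) (a : List (Int × Int) × Option Int × Int) (ha : pvInv a)
    (g : pvZ × pvZ × pvZ × pvZ) :
    pvInv (pvEncStep a x) ∧
      pvApplyZ g (pvFlush (pvEncStep a x)) =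
        pvFz (PySem.Int.mod x 2) (pvApplyZ g (pvFlush a)) := by
  obtain ⟨runs, cp, ck⟩ := a
  obtain ⟨h1, h2⟩ := ha
  simp only at h1 h2
  by_cases hc : cp = some (PySem.Int.mod x 2)
  · rw [show pvEncStep (runs, cp, ck) x = (runs, cp, ck + 1) from by
      simp only [pvEncStep]; rw [if_pos hc]]
    refine ⟨⟨by simp; omega, h2⟩, ?_⟩
    rw [pvApplyZ_flush, pvApplyZ_flush]
    have ht : (ck + 1).toNat = ck.toNat + 1 := by omega
    rw [ht, Function.iterate_succ_apply', hc]
    rfl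
  · rw [show pvEncStep (runs, cp, ck) x =
        ((if ck ≠ 0 then runs ++ [(cp.getD 0, ck)] else runs), some (PySem.Int.mod x 2), 1) from by
      simp only [pvEncStep]
      rw [if_neg hc]]
    have hfl : (if ck ≠ 0 then runs ++ [(cp.getD 0, ck)] else runs) = pvFlush (runs, cp, ck) := rfl
    refine ⟨⟨by norm_num, ?_⟩, ?_⟩
    · rw [hfl]; exact pvFlush_nonneg (runs, cp, ck) ⟨h1, h2⟩
    · rw [pvApplyZ_flush, hfl]
      rfl

-- the encoding pass is equivalent to the per-element forward fold
lemma pvEnc_fold (l : List Int) (a : List (Int × Int) × Option Int × Int)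
    (ha : pvInv a) (g : pvZ × pvZ × pvZ × pvZ) :
    pvInv (l.foldl pvEncStep a) ∧
      pvApplyZ g (pvFlush (l.foldl pvEncStep a)) =
        l.foldl (fun b x => pvFz (PySem.Int.mod x 2) b) (pvApplyZ g (pvFlush a)) := by
  induction l generalizing a with
  | nil => exact ⟨ha, rfl⟩
  | cons x l ih =>
      obtain ⟨hs1, hs2⟩ := pvEnc_step x a ha g
      obtain ⟨hi1, hi2⟩ := ih (pvEncStep a x) hs1
      exact ⟨hi1, by simp only [List.foldl_cons]; rw [hi2, hs2]⟩

-- ===== VERDICT (by name: the statement is the Claim_ definition above) =====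
theorem countStableSubsequences_spec : Claim_equal_countStableSubsequences := by
  intro nums _
  show _ = _
  unfold countStableSubsequences countStableSubsequences_alt
  simp only [PySem.List.len_eq]
  have h1 : PySem.List.pyRange ((nums.length : Int) - 1) (-1) (-1) =
      (PySem.List.pyRange 0 (nums.length : Int) 1).reverse := by
    rw [PySem.List.pyRange_neg_one_eq_reverse]
    norm_num
  rw [h1]
  simp only [List.foldl_reverse]
  have hfold : (PySem.List.pyRange 0 (nums.length : Int) 1).foldr
      (fun x y => pvStepA (PySem.List.pyGetD nums x 0) y)
      ((List.range 3).map (fun _ => List.replicate 3 1)) =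
      nums.foldr (fun x dp => pvStepA x dp)
        ((List.range 3).map (fun _ => List.replicate 3 1)) := by
    conv_rhs => rw [← PySem.List.map_pyGetD_pyRange_zero' nums 0]
    rw [List.foldr_map]
  rw [hfold]
  set dpF := nums.foldr (fun x dp => pvStepA x dp) pvDpInit with hdpF
  set fB := (pvRunsOf nums).foldl pvRunStep (0, 0, 0, 0) with hfB
  set G := nums.foldl (fun b x => pvFz (PySem.Int.mod x 2) b)
      ((0 : pvZ), (0 : pvZ), (0 : pvZ), (0 : pvZ)) with hG
  obtain ⟨hinv, henc⟩ := pvEnc_fold nums ([], none, 0) ⟨by norm_num, by simp⟩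
    ((0 : pvZ), (0 : pvZ), (0 : pvZ), (0 : pvZ))
  rw [show pvFlush (([], none, 0) : List (Int × Int) × Option Int × Int) = [] from rfl] at henc
  rw [show pvApplyZ ((0 : pvZ), (0 : pvZ), (0 : pvZ), (0 : pvZ)) [] =
    ((0 : pvZ), (0 : pvZ), (0 : pvZ), (0 : pvZ)) from rfl] at henc
  have hphi0 : pvPhi ((0 : Int), (0 : Int), (0 : Int), (0 : Int)) =
      ((0 : pvZ), (0 : pvZ), (0 : pvZ), (0 : pvZ)) := by
    simp [pvPhi, pvcast_zero]
  have hBphi : pvPhi fB = G := by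
    rw [hfB, pvRunFold_phi _ _ (by rw [pvRunsOf_eq]; exact pvFlush_nonneg _ hinv), hphi0,
      pvRunsOf_eq, henc, hG]
  have hA : pvcast (pvCell dpF 2 0) = pvP G pvDpInit := by
    have hpf := pvPair_fold nums ((0 : pvZ), (0 : pvZ), (0 : pvZ), (0 : pvZ))
    rw [← hdpF, ← hG] at hpf
    rw [← hpf]
    simp [pvP]
  have hInit : pvP G pvDpInit = G.1 + G.2.1 + G.2.2.1 + G.2.2.2 + 1 := by
    simp only [pvP, show pvCell pvDpInit 2 0 = 1 from rfl, show pvCell pvDpInit 0 1 = 1 from rfl,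
      show pvCell pvDpInit 0 2 = 1 from rfl, show pvCell pvDpInit 1 1 = 1 from rfl,
      show pvCell pvDpInit 1 2 = 1 from rfl, pvcast_one]
    ring
  have hsum : pvcast (fB.1 + fB.2.1 + fB.2.2.1 + fB.2.2.2 + 1) = pvcast (pvCell dpF 2 0) := by
    have hc1 : pvcast fB.1 = G.1 := congrArg Prod.fst hBphi
    have hc2 : pvcast fB.2.1 = G.2.1 := congrArg (fun t => t.2.1) hBphi
    have hc3 : pvcast fB.2.2.1 = G.2.2.1 := congrArg (fun t => t.2.2.1) hBphi
    have hc4 : pvcast fB.2.2.2 = G.2.2.2 := congrArg (fun t => t.2.2.2) hBphi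
    rw [hA, hInit, pvcast_add, pvcast_add, pvcast_add, pvcast_add, pvcast_one, hc1, hc2, hc3, hc4]
  have hrange := pvCell_range nums
  rw [← hdpF] at hrange
  have hmod : PySem.Int.mod (fB.1 + fB.2.1 + fB.2.2.1 + fB.2.2.2 + 1) (10 ^ 9 + 7) =
      pvCell dpF 2 0 := by
    rw [PySem.Int.mod_eq_emod_of_pos (by norm_num)]
    have e1 : pvcast ((fB.1 + fB.2.1 + fB.2.2.1 + fB.2.2.2 + 1) % (10 ^ 9 + 7)) =
        pvcast (pvCell dpF 2 0) := by
      rw [show ((10 : Int) ^ 9 + 7) = (1000000007 : Int) from by norm_num, pvcast_emod, hsum]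
    have hcast : (fB.1 + fB.2.1 + fB.2.2.1 + fB.2.2.2 + 1) % (10 ^ 9 + 7) ≡
        pvCell dpF 2 0 [ZMOD (1000000007 : ℕ)] := (ZMod.intCast_eq_intCast_iff _ _ _).mp e1
    have hM : ((1000000007 : ℕ) : Int) = (10 ^ 9 + 7 : Int) := by norm_num
    unfold Int.ModEq at hcast
    rw [hM, Int.emod_emod_of_dvd _ dvd_rfl,
      Int.emod_eq_of_lt hrange.1 hrange.2] at hcast
    exact hcast
  show pvCell dpF 2 0 - 1 = _
  rw [hmod]
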